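-- pv_equiv track=rewrite | github.com/physical-perception-lab/physical-perception-lab.github.io | build/build.py | build_alumni_html
-- ===== SOURCE A (Python) =====
-- def build_alumni_html(alumni):
--     """Build alumni sections."""
--     s = ''
--
--     # PhD alumni
--     if alumni.get('phd'):
--         s += '<div class="alumni-section">\n'
--         s += '  <h3 class="alumni-section__title">PhD Alumni</h3>\n'
--         s += '  <ul class="alumni-list">\n'
--         for a in alumni['phd']:
--             note = f' ({a["note"]})' if a.get('note') else ''
--             s += f'    <li class="alumni-list__item">'
--             s += f'<a href="{a["url"]}" target="_blank" rel="noopener">{a["name"]}</a>{note}, '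
--             s += f'<span class="alumni-list__thesis">{a.get("thesis", "")}</span>, '
--             s += f'{a.get("year", "")}. {a.get("destination", "")}'
--             s += '</li>\n'
--         s += '  </ul>\n'
--         s += '</div>\n'
--
--     # MSR alumni
--     if alumni.get('msr'):
--         s += '<div class="alumni-section">\n'
--         s += '  <h3 class="alumni-section__title">MSR Alumni</h3>\n'
--         s += '  <ul class="alumni-list">\n'
--         for a in alumni['msr']:
--             dest = f'. {a["destination"]}' if a.get('destination') else ''
--             s += f'    <li class="alumni-list__item">'
--             s += f'<a href="{a["url"]}" target="_blank" rel="noopener">{a["name"]}</a>{dest}'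
--             s += '</li>\n'
--         s += '  </ul>\n'
--         s += '</div>\n'
--
--     # MSCV alumni
--     if alumni.get('mscv'):
--         s += '<div class="alumni-section">\n'
--         s += '  <h3 class="alumni-section__title">MSCV Alumni</h3>\n'
--         s += '  <ul class="alumni-list alumni-list--compact">\n'
--         for a in alumni['mscv']:
--             s += f'    <li class="alumni-list__item">'
--             s += f'<a href="{a["url"]}" target="_blank" rel="noopener">{a["name"]}</a>'
--             s += '</li>\n'
--         s += '  </ul>\n'
--         s += '</div>\n'
--
--     # Undergrad alumni
--     if alumni.get('undergrad'):
--         s += '<div class="alumni-section">\n'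
--         s += '  <h3 class="alumni-section__title">Undergraduate Alumni</h3>\n'
--         s += '  <ul class="alumni-list alumni-list--compact">\n'
--         for a in alumni['undergrad']:
--             s += f'    <li class="alumni-list__item">'
--             s += f'<a href="{a["url"]}" target="_blank" rel="noopener">{a["name"]}</a>'
--             s += '</li>\n'
--         s += '  </ul>\n'
--         s += '</div>\n'
--
--     return s
-- ===== SOURCE B (Python) =====
-- def _link(a):
--     return '<a href="%s" target="_blank" rel="noopener">%s</a>' % (a['url'], a['name'])
--
--
-- def _phd(a):
--     head = _link(a) + (' (%s)' % a['note'] if a.get('note') else '')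
--     thesis = '<span class="alumni-list__thesis">%s</span>' % a.get('thesis', '')
--     tail = '%s. %s' % (a.get('year', ''), a.get('destination', ''))
--     return ', '.join([head, thesis, tail])
--
--
-- def _msr(a):
--     return _link(a) + ('. %s' % a['destination'] if a.get('destination') else '')
--
--
-- _SPECS = [
--     ('phd', 'PhD Alumni', 'alumni-list', _phd),
--     ('msr', 'MSR Alumni', 'alumni-list', _msr),
--     ('mscv', 'MSCV Alumni', 'alumni-list alumni-list--compact', _link),
--     ('undergrad', 'Undergraduate Alumni', 'alumni-list alumni-list--compact', _link),
-- ]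
--
--
-- def _section_lines(specs, alumni):
--     """Recursively turn the spec list into a flat list of output lines."""
--     if not specs:
--         return []
--     key, title, cls, item = specs[0]
--     rest = _section_lines(specs[1:], alumni)
--     entries = alumni.get(key)
--     if not entries:
--         return rest
--     return (['<div class="alumni-section">',
--              '  <h3 class="alumni-section__title">%s</h3>' % title,
--              '  <ul class="%s">' % cls]
--             + ['    <li class="alumni-list__item">%s</li>' % item(a) for a in entries]
--             + ['  </ul>', '</div>']
--             + rest)
--
--
-- def build_alumni_html(alumni):
--     """Build alumni sections: staged — first a list of lines, then one join."""
--     lines = _section_lines(_SPECS, alumni)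
--     return '\n'.join(lines) + '\n' if lines else ''
-- ===== Notes on version B (the rewrite author's own statement) =====
-- stated objective: alternative
-- what changed: B builds the page in two stages: a recursion over a list of section specs produces a flat list of output LINES (items via list comprehensions, the phd line assembled with ', '.join), and a single '\n'.join then produces the string, instead of A's four copy-pasted blocks of incremental string appends.
import Mathlib
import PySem

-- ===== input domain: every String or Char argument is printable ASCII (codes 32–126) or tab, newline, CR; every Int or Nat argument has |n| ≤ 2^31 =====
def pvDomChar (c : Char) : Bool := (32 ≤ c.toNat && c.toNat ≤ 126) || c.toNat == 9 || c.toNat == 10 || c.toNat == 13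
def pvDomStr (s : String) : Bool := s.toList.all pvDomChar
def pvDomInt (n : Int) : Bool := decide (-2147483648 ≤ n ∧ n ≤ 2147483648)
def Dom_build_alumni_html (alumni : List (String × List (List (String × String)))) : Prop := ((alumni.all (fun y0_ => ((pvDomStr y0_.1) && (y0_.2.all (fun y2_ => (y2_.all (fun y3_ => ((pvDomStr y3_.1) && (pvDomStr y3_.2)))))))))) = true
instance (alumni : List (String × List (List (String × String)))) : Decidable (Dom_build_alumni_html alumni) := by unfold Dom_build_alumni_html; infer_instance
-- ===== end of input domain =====

-- B builds the page in two stages — a recursion over section specs producing a flat LIST OF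
-- LINES, then one '\n'.join — instead of A's four copy-pasted blocks of string appends
-- (objective: simpler). Return-value equivalence only; neither mutates its argument.

-- ===== PORT A =====
-- a.get(k, '') on an entry dict; also used for a["url"]/a["name"], which Pre_ guarantees present
def pvGetD (a : List (String × String)) (k : String) : String :=
  (PySem.Dict.mk a).getD k ""

-- alumni.get(k) with falsy (None / []) collapsed to []; also alumni[k] under the truthiness guard
def pvSect (alumni : List (String × List (List (String × String)))) (k : String) :
    List (List (String × String)) :=
  ((PySem.Dict.mk alumni).get? k).getD []

def build_alumni_html (alumni : List (String × List (List (String × String)))) : String :=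
  let s := ""
  -- PhD alumni
  let s := if pvSect alumni "phd" ≠ [] then
    let s := s ++ "<div class=\"alumni-section\">\n"
    let s := s ++ "  <h3 class=\"alumni-section__title\">PhD Alumni</h3>\n"
    let s := s ++ "  <ul class=\"alumni-list\">\n"
    let s := (pvSect alumni "phd").foldl (fun s a =>
      let note := if pvGetD a "note" ≠ "" then " (" ++ pvGetD a "note" ++ ")" else ""
      let s := s ++ "    <li class=\"alumni-list__item\">"
      let s := s ++ "<a href=\"" ++ pvGetD a "url" ++ "\" target=\"_blank\" rel=\"noopener\">" ++ pvGetD a "name" ++ "</a>" ++ note ++ ", "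
      let s := s ++ "<span class=\"alumni-list__thesis\">" ++ pvGetD a "thesis" ++ "</span>, "
      let s := s ++ pvGetD a "year" ++ ". " ++ pvGetD a "destination"
      s ++ "</li>\n") s
    let s := s ++ "  </ul>\n"
    s ++ "</div>\n"
  else s
  -- MSR alumni
  let s := if pvSect alumni "msr" ≠ [] then
    let s := s ++ "<div class=\"alumni-section\">\n"
    let s := s ++ "  <h3 class=\"alumni-section__title\">MSR Alumni</h3>\n"
    let s := s ++ "  <ul class=\"alumni-list\">\n"
    let s := (pvSect alumni "msr").foldl (fun s a =>
      let dest := if pvGetD a "destination" ≠ "" then ". " ++ pvGetD a "destination" else ""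
      let s := s ++ "    <li class=\"alumni-list__item\">"
      let s := s ++ "<a href=\"" ++ pvGetD a "url" ++ "\" target=\"_blank\" rel=\"noopener\">" ++ pvGetD a "name" ++ "</a>" ++ dest
      s ++ "</li>\n") s
    let s := s ++ "  </ul>\n"
    s ++ "</div>\n"
  else s
  -- MSCV alumni
  let s := if pvSect alumni "mscv" ≠ [] then
    let s := s ++ "<div class=\"alumni-section\">\n"
    let s := s ++ "  <h3 class=\"alumni-section__title\">MSCV Alumni</h3>\n"
    let s := s ++ "  <ul class=\"alumni-list alumni-list--compact\">\n"
    let s := (pvSect alumni "mscv").foldl (fun s a =>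
      let s := s ++ "    <li class=\"alumni-list__item\">"
      let s := s ++ "<a href=\"" ++ pvGetD a "url" ++ "\" target=\"_blank\" rel=\"noopener\">" ++ pvGetD a "name" ++ "</a>"
      s ++ "</li>\n") s
    let s := s ++ "  </ul>\n"
    s ++ "</div>\n"
  else s
  -- Undergrad alumni
  let s := if pvSect alumni "undergrad" ≠ [] then
    let s := s ++ "<div class=\"alumni-section\">\n"
    let s := s ++ "  <h3 class=\"alumni-section__title\">Undergraduate Alumni</h3>\n"
    let s := s ++ "  <ul class=\"alumni-list alumni-list--compact\">\n"
    let s := (pvSect alumni "undergrad").foldl (fun s a =>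
      let s := s ++ "    <li class=\"alumni-list__item\">"
      let s := s ++ "<a href=\"" ++ pvGetD a "url" ++ "\" target=\"_blank\" rel=\"noopener\">" ++ pvGetD a "name" ++ "</a>"
      s ++ "</li>\n") s
    let s := s ++ "  </ul>\n"
    s ++ "</div>\n"
  else s
  s

-- ===== PORT B =====
def pvLink (a : List (String × String)) : String :=
  "<a href=\"" ++ pvGetD a "url" ++ "\" target=\"_blank\" rel=\"noopener\">" ++ pvGetD a "name" ++ "</a>"

def pvPhd (a : List (String × String)) : String :=
  let head := pvLink a ++ (if pvGetD a "note" ≠ "" then " (" ++ pvGetD a "note" ++ ")" else "")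
  let thesis := "<span class=\"alumni-list__thesis\">" ++ pvGetD a "thesis" ++ "</span>"
  let tail := pvGetD a "year" ++ ". " ++ pvGetD a "destination"
  PySem.Str.join ", " [head, thesis, tail]

def pvMsr (a : List (String × String)) : String :=
  pvLink a ++ (if pvGetD a "destination" ≠ "" then ". " ++ pvGetD a "destination" else "")

def pvSpecs : List (String × String × String × (List (String × String) → String)) :=
  [("phd", "PhD Alumni", "alumni-list", pvPhd),
   ("msr", "MSR Alumni", "alumni-list", pvMsr),
   ("mscv", "MSCV Alumni", "alumni-list alumni-list--compact", pvLink),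
   ("undergrad", "Undergraduate Alumni", "alumni-list alumni-list--compact", pvLink)]

def pvSectionLines (specs : List (String × String × String × (List (String × String) → String)))
    (alumni : List (String × List (List (String × String)))) : List String :=
  match specs with
  | [] => []
  | spec :: restSpecs =>
    let rest := pvSectionLines restSpecs alumni
    let entries := pvSect alumni spec.1
    if entries = [] then rest
    else
      (["<div class=\"alumni-section\">",
        "  <h3 class=\"alumni-section__title\">" ++ spec.2.1 ++ "</h3>",
        "  <ul class=\"" ++ spec.2.2.1 ++ "\">"]
       ++ entries.map (fun a => "    <li class=\"alumni-list__item\">" ++ spec.2.2.2 a ++ "</li>")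
       ++ ["  </ul>", "</div>"]
       ++ rest)

def build_alumni_html_alt (alumni : List (String × List (List (String × String)))) : String :=
  let lines := pvSectionLines pvSpecs alumni
  if lines ≠ [] then PySem.Str.join "\n" lines ++ "\n" else ""

-- ===== PRECONDITION & SPEC =====
-- Pre_ excludes exactly the inputs on which A raises KeyError: an entry listed under one of the
-- four rendered section keys that lacks an "url" or "name" key (B raises the same KeyError there).
def Pre_build_alumni_html (alumni : List (String × List (List (String × String)))) : Prop :=
  ∀ p ∈ alumni, (p.1 = "phd" ∨ p.1 = "msr" ∨ p.1 = "mscv" ∨ p.1 = "undergrad") →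
    ∀ a ∈ p.2, (PySem.Dict.mk a).contains "url" = true ∧ (PySem.Dict.mk a).contains "name" = true
instance (alumni : List (String × List (List (String × String)))) : Decidable (Pre_build_alumni_html alumni) := by unfold Pre_build_alumni_html; infer_instance

def pvWitness_build_alumni_html : (List (String × List (List (String × String)))) :=
  [("phd", [[("url", "u"), ("name", "Ada"), ("year", "2020")]]), ("mscv", [])]

def Spec_build_alumni_html (alumni : List (String × List (List (String × String)))) (out : String) : Prop := out = build_alumni_html_alt alumni
instance (alumni : List (String × List (List (String × String)))) (out : String) : Decidable (Spec_build_alumni_html alumni out) := by unfold Spec_build_alumni_html; infer_instance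

-- ===== CLAIM (what is proved, stated in full; the proofs are below) =====
def Claim_equal_build_alumni_html : Prop := ∀ (alumni : List (String × List (List (String × String)))), Dom_build_alumni_html alumni → Pre_build_alumni_html alumni → Spec_build_alumni_html alumni (build_alumni_html alumni)

-- ===== LEMMAS AND PROOFS =====

-- concatenation of a list of lines, each terminated by a newline
def pvCatNL : List String → String
  | [] => ""
  | l :: ls => l ++ "\n" ++ pvCatNL ls

theorem pvCatNL_append (xs ys : List String) :
    pvCatNL (xs ++ ys) = pvCatNL xs ++ pvCatNL ys := by
  induction xs with
  | nil => simp [pvCatNL]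
  | cons x xs ih => simp [pvCatNL, ih, String.append_assoc]

theorem pvJoin_nl (L : List String) (h : L ≠ []) :
    PySem.Str.join "\n" L ++ "\n" = pvCatNL L := by
  induction L with
  | nil => exact absurd rfl h
  | cons x xs ih =>
    cases xs with
    | nil =>
      show String.ofList (PySem.Chars.join "\n".toList [x.toList]) ++ "\n" = _
      rw [PySem.Chars.join_singleton, String.ofList_toList]
      simp [pvCatNL]
    | cons y ys =>
      have hrec := ih (by simp)
      show String.ofList (PySem.Chars.join "\n".toList (x.toList :: y.toList :: ys.map String.toList)) ++ "\n" = _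
      rw [PySem.Chars.join_cons_cons, String.ofList_append, String.ofList_append,
        String.ofList_toList]
      have : String.ofList "\n".toList = "\n" := String.ofList_toList
      rw [this]
      have hj : String.ofList (PySem.Chars.join "\n".toList (y.toList :: ys.map String.toList))
          = PySem.Str.join "\n" (y :: ys) := rfl
      rw [hj, pvCatNL, ← hrec, String.append_assoc, String.append_assoc]

theorem pvFoldl_emit {α : Type} (g : α → String) (body : String → α → String)
    (hb : ∀ s a, body s a = s ++ (g a ++ "\n")) (es : List α) (s0 : String) :
    es.foldl body s0 = s0 ++ pvCatNL (es.map g) := by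
  induction es generalizing s0 with
  | nil => simp [pvCatNL]
  | cons e es ih => simp [pvCatNL, hb, ih, String.append_assoc]

theorem pvJoin3 (x y z : String) :
    PySem.Str.join ", " [x, y, z] = x ++ ", " ++ (y ++ (", " ++ z)) := by
  show String.ofList (PySem.Chars.join ", ".toList [x.toList, y.toList, z.toList]) = _
  rw [PySem.Chars.join_cons_cons, PySem.Chars.join_cons_cons, PySem.Chars.join_singleton]
  simp only [String.ofList_append, String.ofList_toList, String.append_assoc]

theorem pvAlt_eq_catNL (alumni : List (String × List (List (String × String)))) :
    build_alumni_html_alt alumni = pvCatNL (pvSectionLines pvSpecs alumni) := by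
  unfold build_alumni_html_alt
  by_cases h : pvSectionLines pvSpecs alumni = []
  · simp [h, pvCatNL]
  · simp [h, pvJoin_nl _ h]

-- ===== VERDICT (by name: the statement is the Claim_ definition above) =====
set_option maxRecDepth 8000 in
set_option maxHeartbeats 2000000 in
theorem build_alumni_html_spec : Claim_equal_build_alumni_html := by
  intro alumni _ _
  unfold Spec_build_alumni_html
  rw [pvAlt_eq_catNL]
  have hphd := pvFoldl_emit
    (fun a => "    <li class=\"alumni-list__item\">" ++ pvPhd a ++ "</li>")
    (fun s a =>
      let note := if pvGetD a "note" ≠ "" then " (" ++ pvGetD a "note" ++ ")" else ""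
      let s := s ++ "    <li class=\"alumni-list__item\">"
      let s := s ++ "<a href=\"" ++ pvGetD a "url" ++ "\" target=\"_blank\" rel=\"noopener\">" ++ pvGetD a "name" ++ "</a>" ++ note ++ ", "
      let s := s ++ "<span class=\"alumni-list__thesis\">" ++ pvGetD a "thesis" ++ "</span>, "
      let s := s ++ pvGetD a "year" ++ ". " ++ pvGetD a "destination"
      s ++ "</li>\n")
    (by
      intro s a
      simp only [pvPhd, pvLink, pvJoin3, String.append_assoc]
      congr 1)
    (pvSect alumni "phd")
  have hmsr := pvFoldl_emit
    (fun a => "    <li class=\"alumni-list__item\">" ++ pvMsr a ++ "</li>")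
    (fun s a =>
      let dest := if pvGetD a "destination" ≠ "" then ". " ++ pvGetD a "destination" else ""
      let s := s ++ "    <li class=\"alumni-list__item\">"
      let s := s ++ "<a href=\"" ++ pvGetD a "url" ++ "\" target=\"_blank\" rel=\"noopener\">" ++ pvGetD a "name" ++ "</a>" ++ dest
      s ++ "</li>\n")
    (by
      intro s a
      simp only [pvMsr, pvLink, String.append_assoc]
      congr 1)
    (pvSect alumni "msr")
  have hlink := fun k => pvFoldl_emit
    (fun a => "    <li class=\"alumni-list__item\">" ++ pvLink a ++ "</li>")
    (fun s a =>
      let s := s ++ "    <li class=\"alumni-list__item\">"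
      let s := s ++ "<a href=\"" ++ pvGetD a "url" ++ "\" target=\"_blank\" rel=\"noopener\">" ++ pvGetD a "name" ++ "</a>"
      s ++ "</li>\n")
    (by
      intro s a
      simp only [pvLink, String.append_assoc]
      congr 1)
    (pvSect alumni k)
  simp only [build_alumni_html, pvSectionLines, pvSpecs]
  rw [hphd, hmsr, hlink "mscv", hlink "undergrad"]
  simp only [ne_eq, ite_not]
  split_ifs <;>
    simp only [pvCatNL, pvCatNL_append, String.append_assoc, String.append_empty,
      String.empty_append] <;>
    (rw [← String.toList_inj]; simp [String.toList_append])
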